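-- pv_equiv track=rewrite | github.com/Brad-Edwards/aptl | src/aptl/services/misp_suricata_sync/translator.py | _escape_content
-- ===== SOURCE A (Python) =====
-- _CONTENT_SAFE = frozenset(
--     b"abcdefghijklmnopqrstuvwxyzABCDEFGHIJKLMNOPQRSTUVWXYZ0123456789._-/?=&"
-- )
--
-- def _escape_content(value: str) -> str:
--     out: list[str] = []
--     for byte in value.encode("utf-8", "replace"):
--         if byte in _CONTENT_SAFE:
--             out.append(chr(byte))
--         else:
--             out.append(f"|{byte:02X}|")
--     return "".join(out)
-- ===== SOURCE B (Python) =====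
-- _CONTENT_SAFE_BYTES = b"abcdefghijklmnopqrstuvwxyzABCDEFGHIJKLMNOPQRSTUVWXYZ0123456789._-/?=&"
-- _CONTENT_SAFE = frozenset(_CONTENT_SAFE_BYTES)
--
--
-- def _escape_content(value: str) -> str:
--     # Run-based scan: instead of handling one byte at a time, find each maximal
--     # run of safe bytes, copy it into the output as a single block, then emit
--     # the escape for the one unsafe byte that ended the run, and continue.
--     data = value.encode("utf-8", "replace")
--     n = len(data)
--     parts = []
--     i = 0
--     while i < n:
--         j = i
--         while j < n and data[j] in _CONTENT_SAFE:
--             j += 1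
--         parts.append(data[i:j].decode("ascii"))
--         if j < n:
--             parts.append("|%02X|" % data[j])
--             j += 1
--         i = j
--     return "".join(parts)
-- ===== Notes on version B (the rewrite author's own statement) =====
-- stated objective: alternative
-- what changed: Replaced A's uniform per-byte append loop with a run-based scan: B finds each maximal run of safe bytes, copies it into the output as one block, then emits the escape of the single unsafe byte that ended the run and continues.
import Mathlib
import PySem

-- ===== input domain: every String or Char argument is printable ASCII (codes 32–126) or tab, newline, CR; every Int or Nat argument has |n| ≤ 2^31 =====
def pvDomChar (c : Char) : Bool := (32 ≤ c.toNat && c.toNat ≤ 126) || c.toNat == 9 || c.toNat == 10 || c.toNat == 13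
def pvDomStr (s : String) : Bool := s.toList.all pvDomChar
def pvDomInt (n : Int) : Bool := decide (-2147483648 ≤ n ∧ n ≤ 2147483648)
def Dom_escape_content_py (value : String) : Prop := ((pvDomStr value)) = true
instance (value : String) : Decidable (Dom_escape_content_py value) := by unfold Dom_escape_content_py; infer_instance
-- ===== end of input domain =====

-- B replaces A's uniform per-byte loop with a run-based scan (maximal safe runs copied
-- as blocks, one escape between runs); same O(n) cost, different structure. On Dom
-- (ASCII) utf-8 encoding is the identity on character codes, so both ports iterate over
-- the character codes of the string (exact on the stated ASCII domain).

-- ===== PORT A =====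
-- the frozenset _CONTENT_SAFE, as the set of byte values
def pvSafeBytes : List Nat :=
  "abcdefghijklmnopqrstuvwxyzABCDEFGHIJKLMNOPQRSTUVWXYZ0123456789._-/?=&".toList.map Char.toNat

-- f"|{byte:02X}|" : two uppercase hex digits between bars (byte < 256)
def pvHexDigit (n : Nat) : Char := if n < 10 then Char.ofNat (48 + n) else Char.ofNat (55 + n)
def pvHexEsc (b : Nat) : List Char := ['|', pvHexDigit (b / 16), pvHexDigit (b % 16), '|']

def escape_content_py (value : String) : String :=
  -- for byte in value.encode(...): out.append(chr(byte) | f"|{byte:02X}|"); "".join(out)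
  String.ofList (((value.toList).foldl
    (fun (out : List (List Char)) c =>
      if c.toNat ∈ pvSafeBytes then out ++ [[c]] else out ++ [pvHexEsc c.toNat])
    []).flatten)

-- ===== PORT B =====
-- byte in _CONTENT_SAFE, as a Bool on characters
def pvIsSafe (c : Char) : Bool := pvSafeBytes.contains c.toNat

-- the while loop of Source B: the inner scan 'while j < n and data[j] in _CONTENT_SAFE'
-- is takeWhile/dropWhile; the safe run is appended as one block, then the escape of
-- the unsafe byte that ended it, then the loop continues on the rest.
def pvRunParts (l : List Char) : List (List Char) :=
  match h : l.dropWhile pvIsSafe with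
  | [] => [l.takeWhile pvIsSafe]
  | c :: rest => l.takeWhile pvIsSafe :: pvHexEsc c.toNat :: pvRunParts rest
termination_by l.length
decreasing_by
  have h1 : (l.dropWhile pvIsSafe).length ≤ l.length := l.length_dropWhile_le pvIsSafe
  rw [h] at h1
  simp at h1
  omega

def escape_content_py_alt (value : String) : String :=
  -- "".join(parts)
  String.ofList ((pvRunParts value.toList).flatten)

-- ===== PRECONDITION & SPEC =====
def Spec_escape_content_py (value : String) (out : String) : Prop := out = escape_content_py_alt value
instance (value : String) (out : String) : Decidable (Spec_escape_content_py value out) := by unfold Spec_escape_content_py; infer_instance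

-- ===== CLAIM (what is proved, stated in full; the proofs are below) =====
def Claim_equal_escape_content_py : Prop := ∀ (value : String), Dom_escape_content_py value → Spec_escape_content_py value (escape_content_py value)

-- ===== LEMMAS AND PROOFS =====

-- A's per-character choice
def pvEscChar (c : Char) : List Char :=
  if c.toNat ∈ pvSafeBytes then [c] else pvHexEsc c.toNat

-- A's foldl, whose branches each append one element, as a flatten of a map
theorem pvFoldA_eq (l : List Char) (acc : List (List Char)) :
    l.foldl (fun out c => if c.toNat ∈ pvSafeBytes then out ++ [[c]] else out ++ [pvHexEsc c.toNat]) acc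
      = acc ++ l.map pvEscChar := by
  induction l generalizing acc with
  | nil => simp
  | cons c l ih =>
    simp only [List.foldl_cons, List.map_cons, ih, pvEscChar]
    split <;> simp

-- on a run of safe characters, A's map flattens back to the run itself
theorem pvFlatten_safe_run (run : List Char) (hrun : ∀ c ∈ run, pvIsSafe c = true) :
    (run.map pvEscChar).flatten = run := by
  induction run with
  | nil => rfl
  | cons c l ih =>
    have hc : pvIsSafe c = true := hrun c (List.mem_cons_self ..)
    have hc' : c.toNat ∈ pvSafeBytes := by
      simpa [pvIsSafe, List.contains_iff_mem] using hc
    simp only [List.map_cons, List.flatten_cons, pvEscChar, if_pos hc',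
      ih (fun d hd => hrun d (List.mem_cons_of_mem _ hd))]
    rfl

-- the run decomposition flattens to A's per-character flatten
theorem pvRunParts_flatten (l : List Char) :
    (pvRunParts l).flatten = (l.map pvEscChar).flatten := by
  rw [pvRunParts]
  split
  · next h =>
    have hl : l.takeWhile pvIsSafe = l := by
      have := l.takeWhile_append_dropWhile (p := pvIsSafe)
      rw [h, List.append_nil] at this
      exact this
    rw [List.flatten_cons, List.flatten_nil, List.append_nil]
    conv_rhs => rw [← hl]
    rw [pvFlatten_safe_run _ (fun c hc => List.mem_takeWhile_imp hc)]
  · next c rest h =>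
    have hsplit : l = l.takeWhile pvIsSafe ++ (c :: rest) := by
      conv_lhs => rw [← l.takeWhile_append_dropWhile (p := pvIsSafe)]
      rw [h]
    have hc : pvIsSafe c = false := by
      have h2 := List.head?_dropWhile_not pvIsSafe l
      rw [h] at h2
      simpa using h2
    have hc' : c.toNat ∉ pvSafeBytes := by
      intro hmem
      have : pvIsSafe c = true := by
        simpa [pvIsSafe, List.contains_iff_mem] using hmem
      simp [this] at hc
    conv_rhs => rw [hsplit]
    rw [List.map_append, List.flatten_append, List.map_cons, List.flatten_cons]
    rw [pvFlatten_safe_run _ (fun d hd => List.mem_takeWhile_imp hd)]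
    simp only [List.flatten_cons, pvEscChar, if_neg hc']
    rw [pvRunParts_flatten rest]
termination_by l.length
decreasing_by
  have h1 : (l.dropWhile pvIsSafe).length ≤ l.length := l.length_dropWhile_le pvIsSafe
  rename_i hdw _
  rw [hdw] at h1
  simp at h1
  omega

-- ===== VERDICT (by name: the statement is the Claim_ definition above) =====
theorem escape_content_py_spec : Claim_equal_escape_content_py := by
  intro value hdom
  unfold Spec_escape_content_py escape_content_py escape_content_py_alt
  rw [pvFoldA_eq, List.nil_append, ← pvRunParts_flatten]
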